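-- pv_equiv track=rewrite | github.com/maxzonder/polymarket-bot | scripts/optimize_big_swan_params.py | positive_compositions
-- ===== SOURCE A (Python) =====
-- from typing import Iterable, Sequence
--
-- def positive_compositions(total_units: int, parts: int) -> Iterable[tuple[int, ...]]:
--     if parts == 0:
--         if total_units == 0:
--             yield ()
--         return
--     if parts == 1:
--         if total_units > 0:
--             yield (total_units,)
--         return
--     for first in range(1, total_units - parts + 2):
--         for tail in positive_compositions(total_units - first, parts - 1):
--             yield (first,) + tail
-- ===== SOURCE B (Python) =====
-- from itertools import combinations
-- from typing import Iterable
--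
-- def positive_compositions(total_units: int, parts: int) -> Iterable[tuple[int, ...]]:
--     if parts == 0:
--         if total_units == 0:
--             yield ()
--         return
--     if parts == 1:
--         if total_units > 0:
--             yield (total_units,)
--         return
--     if parts > total_units:
--         return  # more positive parts than units: nothing to enumerate
--     # stars and bars: choose parts-1 cut points strictly inside [0, total_units]
--     for cuts in combinations(range(1, total_units), parts - 1):
--         bounds = (0,) + cuts + (total_units,)
--         yield tuple(bounds[i + 1] - bounds[i] for i in range(parts))
-- ===== Notes on version B (the rewrite author's own statement) =====
-- stated objective: alternative
-- what changed: Replaces A's recursive first-part enumeration by a flat stars-and-bars enumeration: after a parts>total_units guard, itertools.combinations picks the parts-1 cut points in range(1, total_units) and each composition is the list of consecutive differences of the cut bounds; combinations' lexicographic order reproduces A's order.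
-- outside the precondition, e.g. on positive_compositions(-5, -1): A returns [], B returns []
import Mathlib
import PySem

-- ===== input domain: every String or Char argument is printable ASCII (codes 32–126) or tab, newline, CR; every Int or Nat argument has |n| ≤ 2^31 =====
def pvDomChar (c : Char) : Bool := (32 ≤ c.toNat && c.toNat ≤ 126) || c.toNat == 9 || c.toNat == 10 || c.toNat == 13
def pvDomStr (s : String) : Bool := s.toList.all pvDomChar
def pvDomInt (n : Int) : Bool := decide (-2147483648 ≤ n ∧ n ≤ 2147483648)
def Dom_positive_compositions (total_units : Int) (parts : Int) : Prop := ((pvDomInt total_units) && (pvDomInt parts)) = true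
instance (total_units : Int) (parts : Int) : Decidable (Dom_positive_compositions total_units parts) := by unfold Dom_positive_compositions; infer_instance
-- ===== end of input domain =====

-- B replaces A's recursion by a flat stars-and-bars enumeration of cut points (alternative algorithm,
-- same output-bounded cost). Equivalence is about return values of list(...) of both generators.


-- ===== PORT A =====
-- fuel makes the recursion total; on Pre_ (0 ≤ parts) the fuel parts.toNat is never exhausted,
-- so pcGo is A's recursion step for step (guards in Python's order, nested for/yield = flatMap/map)
def pcGo : Nat → Int → Int → List (List Int)
  | fuel, total_units, parts =>
    if parts == 0 then (if total_units == 0 then [[]] else [])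
    else if parts == 1 then (if total_units > 0 then [[total_units]] else [])
    else match fuel with
      | 0 => []
      | f + 1 =>
        (PySem.List.pyRange 1 (total_units - parts + 2) 1).flatMap
          (fun first => (pcGo f (total_units - first) (parts - 1)).map (fun tail => first :: tail))

def positive_compositions (total_units : Int) (parts : Int) : List (List Int) :=
  pcGo parts.toNat total_units parts

-- ===== PORT B =====
-- itertools.combinations(xs, k) in lexicographic order (hand port of the library call,
-- including its 'r > n: return nothing' shortcut; n carries xs.length)
def pcCombosGo : Nat → Nat → List Int → List (List Int)
  | 0, _, _ => [[]]
  | _ + 1, _, [] => []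
  | k + 1, n, x :: xs =>
    if n < k + 1 then []
    else ((pcCombosGo k (n - 1) xs).map (fun c => x :: c)) ++ pcCombosGo (k + 1) (n - 1) xs

def pcCombos (k : Nat) (xs : List Int) : List (List Int) := pcCombosGo k xs.length xs

-- the comprehension tuple(bounds[i+1]-bounds[i] for i in range(parts)): exact because
-- len(bounds) = parts+1, so it is the list of consecutive differences of bounds
def pcDiffs : List Int → List Int
  | a :: b :: rest => (b - a) :: pcDiffs (b :: rest)
  | _ => []

def positive_compositions_alt (total_units : Int) (parts : Int) : List (List Int) :=
  if parts == 0 then (if total_units == 0 then [[]] else [])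
  else if parts == 1 then (if total_units > 0 then [[total_units]] else [])
  else if parts > total_units then []
  else (pcCombos (parts - 1).toNat (PySem.List.pyRange 1 total_units 1)).map
    (fun cuts => pcDiffs (0 :: (cuts ++ [total_units])))

-- ===== PRECONDITION & SPEC =====
-- Pre_ excludes parts < 0, outside the function's natural domain: there A recurses without bound
-- (RecursionError) whenever total_units >= parts, and only returns an accidental empty list when
-- total_units < parts (B returns [] there too, but B raises ValueError where A recurses).
def Pre_positive_compositions (_total_units : Int) (parts : Int) : Prop := 0 ≤ parts
instance (total_units : Int) (parts : Int) : Decidable (Pre_positive_compositions total_units parts) := by unfold Pre_positive_compositions; infer_instance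
def pvWitness_positive_compositions : Int × Int := (5, 3)

def Spec_positive_compositions (total_units : Int) (parts : Int) (out : List (List Int)) : Prop := out = positive_compositions_alt total_units parts
instance (total_units : Int) (parts : Int) (out : List (List Int)) : Decidable (Spec_positive_compositions total_units parts out) := by unfold Spec_positive_compositions; infer_instance

-- ===== CLAIM (what is proved, stated in full; the proofs are below) =====
def Claim_equal_positive_compositions : Prop := ∀ (total_units : Int) (parts : Int), Dom_positive_compositions total_units parts → Pre_positive_compositions total_units parts → Spec_positive_compositions total_units parts (positive_compositions total_units parts)

-- ===== LEMMAS AND PROOFS =====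
-- proof-side specification of lexicographic combinations (no pruning)
def combosSpec : Nat → List Int → List (List Int)
  | 0, _ => [[]]
  | _ + 1, [] => []
  | k + 1, x :: xs => ((combosSpec k xs).map (fun c => x :: c)) ++ combosSpec (k + 1) xs

theorem combosSpec_map (f : Int → Int) : ∀ (k : Nat) (xs : List Int),
    combosSpec k (xs.map f) = (combosSpec k xs).map (List.map f) := by
  intro k xs
  induction xs generalizing k with
  | nil => cases k <;> simp [combosSpec]
  | cons x xs ih => cases k <;> simp [combosSpec, ih, List.map_map, Function.comp]

theorem combosSpec_nil_of_short : ∀ (k : Nat) (xs : List Int), xs.length < k → combosSpec k xs = [] := by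
  intro k xs
  induction xs generalizing k with
  | nil => intro h; cases k with | zero => omega | succ k => simp [combosSpec]
  | cons x xs ih =>
    intro h
    cases k with
    | zero => omega
    | succ k => simp [combosSpec]; exact ⟨ih k (by simpa using Nat.lt_of_succ_lt_succ h), ih (k+1) (by simp at h ⊢; omega)⟩

theorem combosSpec_one (xs : List Int) : combosSpec 1 xs = xs.map (fun x => [x]) := by
  induction xs with
  | nil => simp [combosSpec]
  | cons x xs ih => simp [combosSpec, ih]

theorem pcDiffs_shift (c : Int) : ∀ (l : List Int), pcDiffs (l.map (fun x => x + c)) = pcDiffs l := by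
  intro l
  induction l with
  | nil => simp [pcDiffs]
  | cons a l ih =>
    cases l with
    | nil => simp [pcDiffs]
    | cons b l' => simp [pcDiffs] at ih ⊢; exact ih
theorem pyRange_shift (a t c : Int) :
    PySem.List.pyRange (a + c) (t + c) 1 = (PySem.List.pyRange a t 1).map (fun x => x + c) := by
  rw [PySem.List.pyRange_one, PySem.List.pyRange_one, List.map_map]
  have : (t + c - (a + c)) = t - a := by ring
  rw [this]
  apply List.map_congr_left
  intro k _
  simp [Function.comp]; ring

theorem combosSpec_range_first (k : Nat) : ∀ (d : Nat) (a t : Int), (t - a).toNat ≤ d →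
    combosSpec (k + 1) (PySem.List.pyRange a t 1)
      = (PySem.List.pyRange a t 1).flatMap
          (fun f => (combosSpec k (PySem.List.pyRange (f + 1) t 1)).map (fun c => f :: c)) := by
  intro d
  induction d with
  | zero =>
    intro a t h
    rw [PySem.List.pyRange_one_eq_nil (by omega)]
    simp [combosSpec]
  | succ d ih =>
    intro a t h
    by_cases hat : a < t
    · rw [PySem.List.pyRange_one_cons hat]
      simp only [combosSpec, List.flatMap_cons]
      rw [ih (a+1) t (by omega)]
    · rw [PySem.List.pyRange_one_eq_nil (by omega)]
      simp [combosSpec]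

theorem flatMap_eq_map_of_mem (l : List Int) (h : Int → List (List Int)) (g : Int → List Int)
    (H : ∀ x ∈ l, h x = [g x]) : l.flatMap h = l.map g := by
  induction l with
  | nil => simp
  | cons x xs ih =>
    simp only [List.flatMap_cons, List.map_cons, H x (by simp)]
    rw [ih (fun y hy => H y (by simp [hy]))]
    simp
theorem flatMap_range_trim (h : Int → List (List Int)) (t c : Int) (hc : c ≤ t)
    (H : ∀ f, c ≤ f → h f = []) :
    (PySem.List.pyRange 1 t 1).flatMap h = (PySem.List.pyRange 1 c 1).flatMap h := by
  by_cases h1 : 1 ≤ c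
  · rw [PySem.List.pyRange_one_append 1 c t h1 hc, List.flatMap_append]
    have : (PySem.List.pyRange c t 1).flatMap h = [] := by
      rw [List.flatMap_eq_nil_iff]
      intro f hf
      exact H f (PySem.List.mem_pyRange_one.mp hf).1
    simp [this]
  · rw [PySem.List.pyRange_one_eq_nil (show c ≤ 1 by omega)]
    simp only [List.flatMap_nil]
    rw [List.flatMap_eq_nil_iff]
    intro f hf
    exact H f (by have := (PySem.List.mem_pyRange_one.mp hf).1; omega)

theorem pcGo_fuel (f1 : Nat) : ∀ (f2 : Nat) (t p : Int), 0 ≤ p → (p-1).toNat ≤ f1 → (p-1).toNat ≤ f2 →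
    pcGo f1 t p = pcGo f2 t p := by
  induction f1 with
  | zero =>
    intro f2 t p hp h1 h2
    have : p = 0 ∨ p = 1 := by omega
    rcases this with h | h <;> subst h <;> rw [pcGo.eq_def, pcGo.eq_def] <;> simp
  | succ f1 ih =>
    intro f2 t p hp h1 h2
    by_cases hsmall : p ≤ 1
    · have : p = 0 ∨ p = 1 := by omega
      rcases this with h | h <;> subst h <;> rw [pcGo.eq_def, pcGo.eq_def] <;> simp
    · cases f2 with
      | zero => omega
      | succ g =>
        show pcGo (f1+1) t p = pcGo (g+1) t p
        simp only [pcGo]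
        have h0 : (p == 0) = false := by simp; omega
        have h1' : (p == 1) = false := by simp; omega
        rw [h0, h1']
        simp only [Bool.false_eq_true, if_false]
        congr 1
        funext first
        rw [ih g (t - first) (p - 1) (by omega) (by omega) (by omega)]
theorem pcCombosGo_eq_spec : ∀ (xs : List Int) (k n : Nat), n = xs.length →
    pcCombosGo k n xs = combosSpec k xs := by
  intro xs
  induction xs with
  | nil => intro k n _; cases k <;> simp [pcCombosGo, combosSpec]
  | cons x xs ih =>
    intro k n hn
    cases k with
    | zero => simp [pcCombosGo, combosSpec]
    | succ k =>
      subst hn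
      simp only [pcCombosGo, List.length_cons, Nat.add_sub_cancel]
      by_cases hlt : xs.length + 1 < k + 1
      · rw [if_pos hlt]
        simp only [combosSpec]
        rw [combosSpec_nil_of_short k xs (by omega), combosSpec_nil_of_short (k+1) xs (by omega)]
        simp
      · rw [if_neg hlt, ih k xs.length rfl, ih (k+1) xs.length rfl]
        simp [combosSpec]

theorem pcCombos_eq_spec (k : Nat) (xs : List Int) : pcCombos k xs = combosSpec k xs :=
  pcCombosGo_eq_spec xs k xs.length rfl

theorem pc_main : ∀ (n : Nat) (t : Int),
    pcGo (n + 1) t ((n : Int) + 2)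
      = (combosSpec (n + 1) (PySem.List.pyRange 1 t 1)).map
          (fun cuts => pcDiffs (0 :: (cuts ++ [t]))) := by
  intro n
  induction n with
  | zero =>
    intro t
    rw [pcGo.eq_def]
    norm_num
    rw [combosSpec_one, List.map_map]
    apply flatMap_eq_map_of_mem
    intro f hf
    have := PySem.List.mem_pyRange_one.mp hf
    rw [pcGo.eq_def]
    norm_num
    rw [if_pos (by omega)]
    simp [pcDiffs]
  | succ n ih =>
    intro t
    -- unfold one step of A
    rw [pcGo.eq_def]
    push_cast
    have h0 : ((n : Int) + 1 + 2 == 0) = false := by simp; omega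
    have h1 : ((n : Int) + 1 + 2 == 1) = false := by simp; omega
    rw [h0, h1]
    simp only [Bool.false_eq_true, if_false]
    have hp1 : (n : Int) + 1 + 2 - 1 = (n : Int) + 2 := by ring
    have hp2 : t - ((n : Int) + 1 + 2) + 2 = t - ((n:Int) + 1) := by ring
    rw [hp1, hp2]
    simp only [ih]
    -- expand B side by first cut point
    rw [combosSpec_range_first (n+1) (t-1).toNat 1 t (le_refl _), List.map_flatMap]
    -- per-first-cut identification
    have per : ∀ f : Int,
        ((combosSpec (n+1) (PySem.List.pyRange (f+1) t 1)).map (fun c => f :: c)).map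
            (fun cuts => pcDiffs (0 :: (cuts ++ [t])))
          = ((combosSpec (n+1) (PySem.List.pyRange 1 (t-f) 1)).map
              (fun cuts => pcDiffs (0 :: (cuts ++ [t-f])))).map (fun tail => f :: tail) := by
      intro f
      have hr : PySem.List.pyRange (f+1) t 1 = (PySem.List.pyRange 1 (t-f) 1).map (fun x => x + f) := by
        have h := pyRange_shift 1 (t-f) f
        have e1 : (1 : Int) + f = f + 1 := by ring
        have e2 : t - f + f = t := by ring
        rw [e1, e2] at h
        exact h
      rw [hr, combosSpec_map, List.map_map, List.map_map]
      rw [List.map_map]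
      apply List.map_congr_left
      intro cuts _
      simp only [Function.comp]
      have hl : f :: (List.map (fun x => x + f) cuts ++ [t]) = (0 :: (cuts ++ [t-f])).map (fun x => x + f) := by
        simp [List.map_append]
      calc pcDiffs (0 :: ((f :: List.map (fun x => x + f) cuts) ++ [t]))
          = (f - 0) :: pcDiffs (f :: (List.map (fun x => x + f) cuts ++ [t])) := by simp [pcDiffs]
        _ = f :: pcDiffs ((0 :: (cuts ++ [t-f])).map (fun x => x + f)) := by rw [hl]; norm_num
        _ = f :: pcDiffs (0 :: (cuts ++ [t-f])) := by rw [pcDiffs_shift]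
    simp only [per]
    -- trim the outer range: cut points ≥ t-(n+1) leave fewer than n+1 slots
    symm
    apply flatMap_range_trim _ t (t - ((n:Int)+1)) (by omega)
    intro f hfge
    have hlen : (PySem.List.pyRange 1 (t-f) 1).length < n + 1 := by
      rw [PySem.List.length_pyRange_one]
      omega
    rw [combosSpec_nil_of_short (n+1) _ hlen]
    simp
theorem positive_compositions_spec : Claim_equal_positive_compositions := by
  intro t p _ hpre
  unfold Spec_positive_compositions
  have hc : p = 0 ∨ p = 1 ∨ 2 ≤ p := by unfold Pre_positive_compositions at hpre; omega
  rcases hc with h | h | h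
  · subst h; simp [positive_compositions, positive_compositions_alt, pcGo]
  · subst h; simp [positive_compositions, positive_compositions_alt, pcGo]
  · obtain ⟨n, hn⟩ : ∃ n : Nat, p = (n : Int) + 2 := ⟨(p - 2).toNat, by omega⟩
    subst hn
    unfold positive_compositions
    have htoNat : ((n : Int) + 2).toNat = n + 2 := by omega
    rw [htoNat]
    rw [pcGo_fuel (n+2) (n+1) t ((n : Int) + 2) (by omega) (by omega) (by omega)]
    rw [pc_main]
    unfold positive_compositions_alt
    rw [pcCombos_eq_spec]
    have h0 : (((n : Int) + 2) == 0) = false := by simp; omega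
    have h1 : (((n : Int) + 2) == 1) = false := by simp; omega
    rw [h0, h1]
    have h2 : ((n : Int) + 2 - 1).toNat = n + 1 := by omega
    rw [h2]
    by_cases hgt : (n : Int) + 2 > t
    · rw [if_pos hgt]
      rw [combosSpec_nil_of_short (n+1) _ (by rw [PySem.List.length_pyRange_one]; omega)]
      simp
    · rw [if_neg hgt]
      simp
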